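-- pv_equiv track=rewrite | github.com/Sangeet-Pannu/GOSIA-Python-Script | GOSIAOUTEX.py | extract_section_P2
-- ===== SOURCE A (Python) =====
-- def extract_section_P2(file_lines, start_marker, end_marker): # Definition comes from wanting GLS information
--     pos_Start=[None]
--     pos_End=[None]
--     for i, line in enumerate(file_lines):
--         if start_marker in line:
--             pos_Start.append(i)
--         if end_marker in line:
--             pos_End.append(i)
--     if pos_Start[-1] is not None:
--         return file_lines[pos_Start[-1] : pos_End[-1]] # records the section of lines we are interested in.
--     return []
-- ===== SOURCE B (Python) =====
-- def extract_section_P2(file_lines, start_marker, end_marker):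
--     # Reverse scan: grab the LAST occurrence of each marker first and stop
--     # as soon as both have been seen.
--     last_start = None
--     last_end = None
--     for i in range(len(file_lines) - 1, -1, -1):
--         line = file_lines[i]
--         if last_start is None and start_marker in line:
--             last_start = i
--         if last_end is None and end_marker in line:
--             last_end = i
--         if last_start is not None and last_end is not None:
--             break
--     if last_start is None:
--         return []
--     return file_lines[last_start:last_end]
-- ===== Notes on version B (the rewrite author's own statement) =====
-- stated objective: alternative
-- what changed: Replaces the forward pass that appends every marker position to two growing lists with a reverse scan that records only the last occurrence of each marker and breaks out as soon as both are known.
import Mathlib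
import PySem

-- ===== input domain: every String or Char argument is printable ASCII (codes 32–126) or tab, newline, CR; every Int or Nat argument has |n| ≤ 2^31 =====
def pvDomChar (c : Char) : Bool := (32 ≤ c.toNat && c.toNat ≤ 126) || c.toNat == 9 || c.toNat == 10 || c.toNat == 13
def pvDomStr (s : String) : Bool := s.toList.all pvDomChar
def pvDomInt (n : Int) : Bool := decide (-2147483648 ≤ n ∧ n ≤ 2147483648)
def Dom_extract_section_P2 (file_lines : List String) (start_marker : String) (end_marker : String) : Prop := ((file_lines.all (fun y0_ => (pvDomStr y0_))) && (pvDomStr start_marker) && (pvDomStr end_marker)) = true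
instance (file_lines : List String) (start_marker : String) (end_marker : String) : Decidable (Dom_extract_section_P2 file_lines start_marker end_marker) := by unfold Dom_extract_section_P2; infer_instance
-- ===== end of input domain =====

-- B replaces A's full forward pass (which appends every marker position to two
-- growing lists) by a reverse scan that keeps only the last occurrence of each
-- marker and breaks as soon as both are known (objective: alternative).

-- ===== PORT A =====
def extract_section_P2 (file_lines : List String) (start_marker : String) (end_marker : String) : List String :=
  let res := (PySem.List.enumerate file_lines 0).foldl
    (fun (acc : List (Option Int) × List (Option Int)) (p : Int × String) =>
      let acc1 := if PySem.Str.isIn start_marker p.2 then (acc.1 ++ [some p.1], acc.2) else acc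
      if PySem.Str.isIn end_marker p.2 then (acc1.1, acc1.2 ++ [some p.1]) else acc1)
    ([none], [none])
  match PySem.List.pyGetD res.1 (-1) none with
  | some s => PySem.List.slice file_lines (some s) (PySem.List.pyGetD res.2 (-1) none)
  | none => []

-- ===== PORT B =====
-- B's reverse loop with early break: sets each slot the first time its marker is
-- seen in the reverse walk, stops once both slots are filled.
def pvAltLoop (sm em : String) : List (Int × String) → Option Int → Option Int → Option Int × Option Int
  | [], ls, le => (ls, le)
  | (i, line) :: rest, ls, le =>
    let ls' := if ls.isNone && PySem.Str.isIn sm line then some i else ls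
    let le' := if le.isNone && PySem.Str.isIn em line then some i else le
    if ls'.isSome && le'.isSome then (ls', le') else pvAltLoop sm em rest ls' le'

def extract_section_P2_alt (file_lines : List String) (start_marker : String) (end_marker : String) : List String :=
  let r := pvAltLoop start_marker end_marker ((PySem.List.enumerate file_lines 0).reverse) none none
  match r.1 with
  | none => []
  | some s => PySem.List.slice file_lines (some s) r.2

-- ===== PRECONDITION & SPEC =====
def Spec_extract_section_P2 (file_lines : List String) (start_marker : String) (end_marker : String) (out : List String) : Prop := out = extract_section_P2_alt file_lines start_marker end_marker
instance (file_lines : List String) (start_marker : String) (end_marker : String) (out : List String) : Decidable (Spec_extract_section_P2 file_lines start_marker end_marker out) := by unfold Spec_extract_section_P2; infer_instance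

-- ===== CLAIM (what is proved, stated in full; the proofs are below) =====
def Claim_equal_extract_section_P2 : Prop := ∀ (file_lines : List String) (start_marker : String) (end_marker : String), Dom_extract_section_P2 file_lines start_marker end_marker → Spec_extract_section_P2 file_lines start_marker end_marker (extract_section_P2 file_lines start_marker end_marker)

-- ===== LEMMAS AND PROOFS =====

-- A's foldl appends exactly the filtered positions to each accumulator.
theorem foldA_spec (sm em : String) (l : List (Int × String)) (a b : List (Option Int)) :
    l.foldl
      (fun (acc : List (Option Int) × List (Option Int)) (p : Int × String) =>
        let acc1 := if PySem.Str.isIn sm p.2 then (acc.1 ++ [some p.1], acc.2) else acc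
        if PySem.Str.isIn em p.2 then (acc1.1, acc1.2 ++ [some p.1]) else acc1)
      (a, b)
    = (a ++ (l.filter (fun p => PySem.Str.isIn sm p.2)).map (fun p => some p.1),
       b ++ (l.filter (fun p => PySem.Str.isIn em p.2)).map (fun p => some p.1)) := by
  induction l generalizing a b with
  | nil => simp
  | cons x xs ih =>
    simp only [List.foldl_cons, List.filter_cons]
    cases hs : PySem.Str.isIn sm x.2 <;> cases he : PySem.Str.isIn em x.2 <;>
      simp only [hs, he, Bool.false_eq_true, if_false, if_true,
        List.map_cons, ih, List.append_assoc, List.singleton_append]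

-- B's loop computes, for each slot, its input value or else the first hit in the
-- remaining list — the break never discards an undetermined slot.
theorem altLoop_spec (sm em : String) (l : List (Int × String)) :
    ∀ (ls le : Option Int), ¬ (ls.isSome ∧ le.isSome) →
    pvAltLoop sm em l ls le
      = (ls.or ((l.find? (fun p => PySem.Str.isIn sm p.2)).map (fun p => p.1)),
         le.or ((l.find? (fun p => PySem.Str.isIn em p.2)).map (fun p => p.1))) := by
  induction l with
  | nil => intro ls le h; simp [pvAltLoop]
  | cons x xs ih =>
    intro ls le h
    obtain ⟨i, line⟩ := x
    have i1 := ih none none (by simp)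
    have i2 := fun s => ih (some s) none (by simp)
    have i3 := fun e => ih none (some e) (by simp)
    cases ls <;> cases le <;>
      cases hs : PySem.Str.isIn sm line <;> cases he : PySem.Str.isIn em line <;>
      simp_all [pvAltLoop]

-- last element of [none] ++ (filtered positions wrapped in some) = last hit
theorem last_of_none_cons (l : List (Int × String)) (p : Int × String → Bool) :
    PySem.List.pyGetD ((none : Option Int) :: (l.filter p).map (fun q => some q.1)) (-1) none
      = ((l.filter p).getLast?).map (fun q => q.1) := by
  rw [PySem.List.pyGetD_neg_one _ _ (by simp)]
  rw [List.getLast_eq_iff_getLast?_eq_some]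
  rw [List.getLast?_cons, List.getLast?_map]
  cases (l.filter p).getLast? <;> simp

-- first hit in the reversed list = last hit in the list
theorem find?_reverse_eq_getLast?_filter (l : List (Int × String)) (p : Int × String → Bool) :
    l.reverse.find? p = (l.filter p).getLast? := by
  rw [← List.head?_filter, List.filter_reverse, List.head?_reverse]

-- ===== VERDICT (by name: the statement is the Claim_ definition above) =====
theorem extract_section_P2_spec : Claim_equal_extract_section_P2 := by
  intro fl sm em _
  unfold Spec_extract_section_P2 extract_section_P2 extract_section_P2_alt
  rw [foldA_spec, altLoop_spec sm em _ none none (by simp)]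
  simp only [List.singleton_append, Option.none_or, find?_reverse_eq_getLast?_filter,
    last_of_none_cons]
  cases (List.filter (fun p => PySem.Str.isIn sm p.2) (PySem.List.enumerate fl)).getLast? <;> rfl
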